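-- pv_equiv track=rewrite | github.com/MAINSETS/Kriptografi | Vigenere Cipher Extended.py | fiveletters
-- ===== SOURCE A (Python) =====
-- def fiveletters(text):
--     newtext = ""
--     count = 0
--     for i in text:
--         if count%5 == 0:
--             newtext = newtext + " "
--         newtext = newtext + i
--         count = count + 1
--     return newtext
-- ===== SOURCE B (Python) =====
-- def fiveletters(text):
--     return "".join(" " + text[i:i+5] for i in range(0, len(text), 5))
-- ===== Notes on version B (the rewrite author's own statement) =====
-- stated objective: faster
-- what changed: Replaces the character-by-character loop with a modulo counter by a single str.join over space-prefixed 5-character slices taken with range(0, len(text), 5).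
import Mathlib
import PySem

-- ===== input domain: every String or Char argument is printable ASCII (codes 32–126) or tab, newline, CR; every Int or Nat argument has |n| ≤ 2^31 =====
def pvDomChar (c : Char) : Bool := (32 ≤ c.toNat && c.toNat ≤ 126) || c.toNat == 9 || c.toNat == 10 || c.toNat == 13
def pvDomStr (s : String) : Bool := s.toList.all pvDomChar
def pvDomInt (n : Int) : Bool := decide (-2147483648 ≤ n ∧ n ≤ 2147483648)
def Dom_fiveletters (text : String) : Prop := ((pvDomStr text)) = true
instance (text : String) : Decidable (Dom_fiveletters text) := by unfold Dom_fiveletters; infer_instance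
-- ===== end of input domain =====

-- ===== PORT A =====
-- B builds the output by joining " " + text[i:i+5] over range(0,len,5) instead of A's per-character loop with a modulo counter.
-- A: character loop with counter; appends " " whenever count % 5 == 0 (count stays ≥ 0, so Lean's Int % matches Python's here).
def fivelettersLoop : List Char → List Char → Int → List Char
  | [], newtext, _ => newtext
  | i :: rest, newtext, count =>
      let newtext := if count % 5 == 0 then newtext ++ [' '] else newtext
      fivelettersLoop rest (newtext ++ [i]) (count + 1)

def fiveletters (text : String) : String :=
  String.mk (fivelettersLoop text.toList [] 0)

-- ===== PORT B =====
-- B: "".join(" " + text[i:i+5] for i in range(0, len(text), 5)); text[i:i+5] is PySem.List.slice.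
def fiveletters_alt (text : String) : String :=
  String.mk ((PySem.List.pyRange 0 (text.toList.length : Int) 5).foldl
    (fun acc i => acc ++ (' ' :: PySem.List.slice text.toList (some i) (some (i + 5)))) [])

-- ===== PRECONDITION & SPEC =====
def Spec_fiveletters (text : String) (out : String) : Prop := out = fiveletters_alt text
instance (text : String) (out : String) : Decidable (Spec_fiveletters text out) := by unfold Spec_fiveletters; infer_instance

-- ===== CLAIM (what is proved, stated in full; the proofs are below) =====
def Claim_equal_fiveletters : Prop := ∀ (text : String), Dom_fiveletters text → Spec_fiveletters text (fiveletters text)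

-- ===== LEMMAS AND PROOFS =====

-- common reference shape used only in the proofs: the output, chunk by chunk
def fivelettersChunks : List Char → List Char
  | [] => []
  | h :: t => (' ' :: ((h :: t).take 5)) ++ fivelettersChunks ((h :: t).drop 5)
  termination_by l => l.length
  decreasing_by simp

theorem chunks_nil : fivelettersChunks [] = [] := by rw [fivelettersChunks]

theorem chunks_cons (h : Char) (t : List Char) :
    fivelettersChunks (h :: t) = (' ' :: (h :: t).take 5) ++ fivelettersChunks (t.drop 4) := by
  rw [fivelettersChunks]; rfl

theorem chunks_ne (l : List Char) (hl : l ≠ []) :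
    fivelettersChunks l = (' ' :: l.take 5) ++ fivelettersChunks (l.drop 5) := by
  match l with
  | [] => exact absurd rfl hl
  | h :: t => rw [chunks_cons]; rfl

-- A's loop output depends on the counter only through its value mod 5
theorem fivelettersLoop_mod (l : List Char) : ∀ (acc : List Char) (c : Int),
    fivelettersLoop l acc c = fivelettersLoop l acc (c % 5) := by
  induction l with
  | nil => intro acc c; rfl
  | cons i rest ih =>
      intro acc c
      have hm : c % 5 % 5 = c % 5 := by omega
      have hm2 : (c % 5 + 1) % 5 = (c + 1) % 5 := by omega
      simp only [fivelettersLoop, hm]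
      rw [ih _ (c + 1), ih _ (c % 5 + 1), hm2]

-- A's loop is append-accumulating
theorem fivelettersLoop_acc (l : List Char) : ∀ (acc : List Char) (c : Int),
    fivelettersLoop l acc c = acc ++ fivelettersLoop l [] c := by
  induction l with
  | nil => intro acc c; simp [fivelettersLoop]
  | cons i rest ih =>
      intro acc c
      simp only [fivelettersLoop]
      conv_lhs => rw [ih]
      conv_rhs => rw [ih]
      split <;> simp

theorem fivelettersLoop_eq_chunks (n : Nat) :
    ∀ (l : List Char), l.length ≤ n → fivelettersLoop l [] 0 = fivelettersChunks l := by
  induction n with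
  | zero =>
      intro l hl
      have : l = [] := List.eq_nil_of_length_eq_zero (Nat.le_zero.mp hl)
      subst this; simp [fivelettersLoop, chunks_nil]
  | succ n ih =>
      intro l hl
      match l with
      | [] => simp [fivelettersLoop, chunks_nil]
      | [a] => simp [fivelettersLoop, chunks_nil, chunks_cons]
      | [a, b] => simp [fivelettersLoop, chunks_nil, chunks_cons]
      | [a, b, c] => simp [fivelettersLoop, chunks_nil, chunks_cons]
      | [a, b, c, d] => simp [fivelettersLoop, chunks_nil, chunks_cons]
      | a :: b :: c :: d :: e :: rest =>
          show fivelettersLoop _ [] 0 = _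
          simp only [fivelettersLoop]
          norm_num
          rw [fivelettersLoop_mod rest _ 5]
          norm_num
          rw [fivelettersLoop_acc rest]
          rw [ih rest (by simp at hl ⊢; omega)]
          simp [chunks_cons]

-- unfold one step of pyRange with step 5
theorem pyRange5_cons (a b : Int) (h : a < b) :
    PySem.List.pyRange a b 5 = a :: PySem.List.pyRange (a + 5) b 5 := by
  rw [PySem.List.pyRange_of_pos a b (by norm_num), PySem.List.pyRange_of_pos (a + 5) b (by norm_num)]
  by_cases h2 : a + 5 < b
  · have key : ((b - a + 5 - 1) / 5).toNat = ((b - (a + 5) + 5 - 1) / 5).toNat + 1 := by omega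
    rw [if_pos h, if_pos h2, key, List.range_succ_eq_map]
    simp only [List.map_cons, List.map_map]
    congr 1
    · norm_num
    · exact List.map_congr_left fun k _ => by simp [Function.comp]; push_cast; ring
  · have key : ((b - a + 5 - 1) / 5).toNat = 1 := by omega
    rw [if_pos h, if_neg h2, key]
    simp
theorem foldB_eq_chunks (full : List Char) (n : Nat) : ∀ (k : Nat) (acc : List Char),
    full.length ≤ k + n →
    (PySem.List.pyRange (k : Int) (full.length : Int) 5).foldl
      (fun acc i => acc ++ (' ' :: PySem.List.slice full (some i) (some (i + 5)))) acc
      = acc ++ fivelettersChunks (full.drop k) := by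
  induction n with
  | zero =>
      intro k acc hk
      have hge : ¬ ((k : Int) < (full.length : Int)) := by
        push_cast; omega
      rw [PySem.List.pyRange_of_pos _ _ (by norm_num), if_neg hge]
      rw [List.drop_eq_nil_of_le (by omega)]
      simp [chunks_nil]
  | succ n ih =>
      intro k acc hk
      by_cases hlt : k < full.length
      · rw [pyRange5_cons _ _ (by exact_mod_cast hlt)]
        simp only [List.foldl_cons]
        have hslice : PySem.List.slice full (some (k : Int)) (some ((k : Int) + 5))
            = (full.drop k).take 5 := by
          have := PySem.List.slice_natCast_add full k 5
          simpa using this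
        have hcast : ((k : Int) + 5) = ((k + 5 : Nat) : Int) := by push_cast; ring
        rw [hslice, hcast, ih (k + 5) _ (by omega)]
        rw [chunks_ne (full.drop k) (by simp; omega), List.drop_drop]
        simp
      · have hge : ¬ ((k : Int) < (full.length : Int)) := by push_cast; omega
        rw [PySem.List.pyRange_of_pos _ _ (by norm_num), if_neg hge]
        rw [List.drop_eq_nil_of_le (by omega)]
        simp [chunks_nil]

-- ===== VERDICT (by name: the statement is the Claim_ definition above) =====
theorem fiveletters_spec : Claim_equal_fiveletters := by
  intro text _
  unfold Spec_fiveletters fiveletters fiveletters_alt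
  rw [fivelettersLoop_eq_chunks text.toList.length text.toList le_rfl]
  rw [show ((0 : Int) = ((0 : Nat) : Int)) from rfl,
      foldB_eq_chunks text.toList text.toList.length 0 [] (by omega)]
  simp
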